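-- pv_equiv track=rewrite | github.com/kiwidamien/katas | 2022/day17_puzzle.py | _gas_move
-- ===== SOURCE A (Python) =====
-- def _gas_move(state, width, jet, current_rock_loc, current_rock_shape):
--     proposed_shift = -1 if jet == "<" else 1
--     proposed_shape_and_loc = {
--         (y + current_rock_loc[0], x + current_rock_loc[1] + proposed_shift)
--         for y, x in current_rock_shape
--     }
--     if proposed_shape_and_loc.intersection(state):
--         return current_rock_loc
--     for _, x in proposed_shape_and_loc:
--         if x < 0 or x >=width:
--             return current_rock_loc
--     return (current_rock_loc[0], current_rock_loc[1] + proposed_shift)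
-- ===== SOURCE B (Python) =====
-- def _gas_move(state, width, jet, current_rock_loc, current_rock_shape):
--     shift = -1 if jet == "<" else 1
--     y0, x0 = current_rock_loc
--     if not current_rock_shape:
--         return (y0, x0 + shift)
--     # aggregate bounds test: the whole rock fits iff its extreme columns fit
--     xs = [x for _, x in current_rock_shape]
--     if min(xs) + x0 + shift < 0 or max(xs) + x0 + shift >= width:
--         return current_rock_loc
--     # inverted collision test: un-shift each occupied cell and look it up in the raw shape
--     shape = set(current_rock_shape)
--     for sy, sx in state:
--         if (sy - y0, sx - x0 - shift) in shape:
--             return current_rock_loc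
--     return (y0, x0 + shift)
-- ===== Notes on version B (the rewrite author's own statement) =====
-- stated objective: alternative
-- what changed: B never shifts the rock: it checks bounds once via min/max of the shape's x-offsets (interval test instead of per-cell loop) and detects collisions by traversing state, un-shifting each occupied cell and looking it up in a set of the raw shape, instead of A's build-shifted-set + intersection + bounds loop.
import Mathlib
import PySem

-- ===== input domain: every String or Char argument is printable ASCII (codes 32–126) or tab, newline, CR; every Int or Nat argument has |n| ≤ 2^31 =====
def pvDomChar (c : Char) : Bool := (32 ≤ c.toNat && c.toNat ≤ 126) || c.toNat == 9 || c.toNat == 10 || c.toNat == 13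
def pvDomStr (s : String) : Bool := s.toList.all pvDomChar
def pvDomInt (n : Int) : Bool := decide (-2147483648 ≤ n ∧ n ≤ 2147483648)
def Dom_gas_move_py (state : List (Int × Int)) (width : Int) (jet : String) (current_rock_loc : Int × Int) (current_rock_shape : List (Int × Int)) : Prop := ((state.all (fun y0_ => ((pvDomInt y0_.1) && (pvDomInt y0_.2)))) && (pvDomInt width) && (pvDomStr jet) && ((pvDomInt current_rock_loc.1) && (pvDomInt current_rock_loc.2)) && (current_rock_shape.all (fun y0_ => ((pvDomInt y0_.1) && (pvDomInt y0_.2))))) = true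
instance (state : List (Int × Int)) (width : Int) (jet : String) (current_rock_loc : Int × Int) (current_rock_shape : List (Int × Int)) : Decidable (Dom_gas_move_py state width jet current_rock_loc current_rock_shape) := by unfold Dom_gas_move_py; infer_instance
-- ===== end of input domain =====

-- B never shifts the rock: it checks bounds once via min/max of the shape's x-offsets and
-- detects collisions by un-shifting each state cell and looking it up in the raw shape
-- (objective: alternative; same return value, no side effects).

-- ===== PORT A =====
-- A's for-loop over the set returns the same value on every hit, so porting it via List.any
-- is exact despite Python's unmodelled set iteration order.
def gas_move_py (state : List (Int × Int)) (width : Int) (jet : String) (current_rock_loc : Int × Int) (current_rock_shape : List (Int × Int)) : Int × Int :=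
  let proposed_shift : Int := if jet == "<" then -1 else 1
  let proposed_shape_and_loc : PySem.Set (Int × Int) :=
    PySem.Set.ofList (current_rock_shape.map
      (fun c => (c.1 + current_rock_loc.1, c.2 + current_rock_loc.2 + proposed_shift)))
  if PySem.Set.inter proposed_shape_and_loc state ≠ [] then
    current_rock_loc
  else if proposed_shape_and_loc.any (fun c => decide (c.2 < 0) || decide (c.2 ≥ width)) then
    current_rock_loc
  else
    (current_rock_loc.1, current_rock_loc.2 + proposed_shift)

-- ===== PORT B =====
-- the 'for sy, sx in state' loop of Source B
def gasAltStateLoop (shape : PySem.Set (Int × Int)) (loc : Int × Int) (ps : Int) :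
    List (Int × Int) → Int × Int
  | [] => (loc.1, loc.2 + ps)
  | s :: rest =>
    if PySem.Set.contains shape (s.1 - loc.1, s.2 - loc.2 - ps) then loc
    else gasAltStateLoop shape loc ps rest

def gas_move_py_alt (state : List (Int × Int)) (width : Int) (jet : String) (current_rock_loc : Int × Int) (current_rock_shape : List (Int × Int)) : Int × Int :=
  let shift : Int := if jet == "<" then -1 else 1
  match current_rock_shape with
  | [] => (current_rock_loc.1, current_rock_loc.2 + shift)
  | c :: rest =>
    -- min(xs)/max(xs) of Source B, xs nonempty: left fold, exact for ints
    let mn := (rest.map Prod.snd).foldl min c.2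
    let mx := (rest.map Prod.snd).foldl max c.2
    if mn + current_rock_loc.2 + shift < 0 ∨ mx + current_rock_loc.2 + shift ≥ width then
      current_rock_loc
    else
      gasAltStateLoop (PySem.Set.ofList (c :: rest)) current_rock_loc shift state

-- ===== PRECONDITION & SPEC =====
def Spec_gas_move_py (state : List (Int × Int)) (width : Int) (jet : String) (current_rock_loc : Int × Int) (current_rock_shape : List (Int × Int)) (out : Int × Int) : Prop := out = gas_move_py_alt state width jet current_rock_loc current_rock_shape
instance (state : List (Int × Int)) (width : Int) (jet : String) (current_rock_loc : Int × Int) (current_rock_shape : List (Int × Int)) (out : Int × Int) : Decidable (Spec_gas_move_py state width jet current_rock_loc current_rock_shape out) := by unfold Spec_gas_move_py; infer_instance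

-- ===== CLAIM (what is proved, stated in full; the proofs are below) =====
def Claim_equal_gas_move_py : Prop := ∀ (state : List (Int × Int)) (width : Int) (jet : String) (current_rock_loc : Int × Int) (current_rock_shape : List (Int × Int)), Dom_gas_move_py state width jet current_rock_loc current_rock_shape → Spec_gas_move_py state width jet current_rock_loc current_rock_shape (gas_move_py state width jet current_rock_loc current_rock_shape)

-- ===== LEMMAS AND PROOFS =====

theorem foldl_min_lt_iff (l : List Int) (a t : Int) :
    (l.foldl min a < t) ↔ (a < t ∨ ∃ x ∈ l, x < t) := by
  induction l generalizing a with
  | nil => simp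
  | cons x xs ih =>
    simp only [List.foldl_cons, ih, min_lt_iff, List.exists_mem_cons_iff]
    tauto

theorem le_foldl_max_iff (l : List Int) (a t : Int) :
    (t ≤ l.foldl max a) ↔ (t ≤ a ∨ ∃ x ∈ l, t ≤ x) := by
  induction l generalizing a with
  | nil => simp
  | cons x xs ih =>
    simp only [List.foldl_cons, ih, le_max_iff, List.exists_mem_cons_iff]
    tauto

-- B's state loop characterised: it returns `loc` iff some state cell, un-shifted, is in the shape.
theorem gasAltStateLoop_eq (shape : PySem.Set (Int × Int)) (loc : Int × Int) (ps : Int)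
    (state : List (Int × Int)) :
    gasAltStateLoop shape loc ps state =
      if ∃ s ∈ state, (s.1 - loc.1, s.2 - loc.2 - ps) ∈ shape then loc
      else (loc.1, loc.2 + ps) := by
  induction state with
  | nil => simp [gasAltStateLoop]
  | cons s rest ih =>
    by_cases h : (s.1 - loc.1, s.2 - loc.2 - ps) ∈ shape
    · simp [gasAltStateLoop, PySem.Set.contains, h]
    · simp only [gasAltStateLoop, PySem.Set.contains, List.contains_eq_mem, h,
        decide_false, Bool.false_eq_true, if_false, ih, List.exists_mem_cons_iff, false_or]

-- A characterised as one condition over the shifted cells.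
theorem gasA_eq (state : List (Int × Int)) (width : Int) (jet : String)
    (loc : Int × Int) (shape : List (Int × Int)) :
    gas_move_py state width jet loc shape =
      (let ps : Int := if jet == "<" then -1 else 1
       if (∃ c ∈ shape, (c.1 + loc.1, c.2 + loc.2 + ps) ∈ state)
          ∨ (∃ c ∈ shape, c.2 + loc.2 + ps < 0 ∨ c.2 + loc.2 + ps ≥ width) then loc
       else (loc.1, loc.2 + ps)) := by
  unfold gas_move_py
  set ps : Int := if jet == "<" then -1 else 1 with hps
  set mapped : List (Int × Int) :=
    shape.map (fun c => (c.1 + loc.1, c.2 + loc.2 + ps)) with hmapped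
  have hinter : (PySem.Set.inter (PySem.Set.ofList mapped) state ≠ [])
      ↔ ∃ c ∈ shape, (c.1 + loc.1, c.2 + loc.2 + ps) ∈ state := by
    constructor
    · intro h
      obtain ⟨p, hp⟩ := List.exists_mem_of_ne_nil _ h
      simp only [PySem.Set.inter, List.mem_filter, PySem.Set.contains,
        List.contains_eq_mem, PySem.Set.mem_ofList, decide_eq_true_eq, hmapped,
        List.mem_map] at hp
      obtain ⟨⟨c, hc, rfl⟩, hs⟩ := hp
      exact ⟨c, hc, hs⟩
    · rintro ⟨c, hc, hs⟩
      refine List.ne_nil_of_mem (a := (c.1 + loc.1, c.2 + loc.2 + ps)) ?_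
      simp only [PySem.Set.inter, List.mem_filter, PySem.Set.contains,
        List.contains_eq_mem, PySem.Set.mem_ofList, decide_eq_true_eq, hmapped,
        List.mem_map]
      exact ⟨⟨c, hc, rfl⟩, hs⟩
  have hany : ((PySem.Set.ofList mapped).any
        (fun c => decide (c.2 < 0) || decide (c.2 ≥ width)) = true)
      ↔ ∃ c ∈ shape, c.2 + loc.2 + ps < 0 ∨ c.2 + loc.2 + ps ≥ width := by
    simp [List.any_eq_true, PySem.Set.mem_ofList, hmapped, List.mem_map]
  by_cases h1 : PySem.Set.inter (PySem.Set.ofList mapped) state ≠ []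
  · rw [if_pos h1, if_pos (Or.inl (hinter.1 h1))]
  · by_cases h2 : (PySem.Set.ofList mapped).any
        (fun c => decide (c.2 < 0) || decide (c.2 ≥ width)) = true
    · rw [if_neg h1, if_pos h2, if_pos (Or.inr (hany.1 h2))]
    · rw [if_neg h1, if_neg h2, if_neg ?_]
      rintro (h | h)
      · exact h1 (hinter.2 h)
      · exact h2 (hany.2 h)

theorem gas_move_py_spec : Claim_equal_gas_move_py := by
  intro state width jet loc shape _
  unfold Spec_gas_move_py gas_move_py_alt
  rw [gasA_eq]
  set ps : Int := if jet == "<" then -1 else 1 with hps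
  cases shape with
  | nil => simp
  | cons c rest =>
    dsimp only
    rw [gasAltStateLoop_eq]
    -- B's bounds condition via the min/max folds
    have hmn : ((rest.map Prod.snd).foldl min c.2 + loc.2 + ps < 0)
        ↔ ∃ d ∈ c :: rest, d.2 + loc.2 + ps < 0 := by
      have := foldl_min_lt_iff (rest.map Prod.snd) c.2 (-(loc.2 + ps))
      simp only [List.mem_map, List.exists_mem_cons_iff] at this ⊢
      constructor
      · intro h
        rcases this.1 (by omega) with h' | ⟨x, ⟨d, hd, rfl⟩, hx⟩
        · exact Or.inl (by omega)
        · exact Or.inr ⟨d, hd, by omega⟩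
      · rintro (h | ⟨d, hd, h⟩)
        · have := this.2 (Or.inl (by omega)); omega
        · have := this.2 (Or.inr ⟨d.2, ⟨d, hd, rfl⟩, by omega⟩); omega
    have hmx : ((rest.map Prod.snd).foldl max c.2 + loc.2 + ps ≥ width)
        ↔ ∃ d ∈ c :: rest, d.2 + loc.2 + ps ≥ width := by
      have := le_foldl_max_iff (rest.map Prod.snd) c.2 (width - loc.2 - ps)
      simp only [List.mem_map, List.exists_mem_cons_iff] at this ⊢
      constructor
      · intro h
        rcases this.1 (by omega) with h' | ⟨x, ⟨d, hd, rfl⟩, hx⟩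
        · exact Or.inl (by omega)
        · exact Or.inr ⟨d, hd, by omega⟩
      · rintro (h | ⟨d, hd, h⟩)
        · have := this.2 (Or.inl (by omega)); omega
        · have := this.2 (Or.inr ⟨d.2, ⟨d, hd, rfl⟩, by omega⟩); omega
    -- B's collision condition equals A's
    have hcoll : (∃ s ∈ state, (s.1 - loc.1, s.2 - loc.2 - ps) ∈ PySem.Set.ofList (c :: rest))
        ↔ ∃ d ∈ c :: rest, (d.1 + loc.1, d.2 + loc.2 + ps) ∈ state := by
      simp only [PySem.Set.mem_ofList]
      constructor
      · rintro ⟨s, hs, hd⟩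
        refine ⟨_, hd, ?_⟩
        have hsv : (s.1 - loc.1 + loc.1, s.2 - loc.2 - ps + loc.2 + ps) = s := by
          ext <;> ring
        rwa [hsv]
      · rintro ⟨d, hd, hs⟩
        refine ⟨_, hs, ?_⟩
        have hdv : (d.1 + loc.1 - loc.1, d.2 + loc.2 + ps - loc.2 - ps) = d := by
          ext <;> ring
        rwa [hdv]
    by_cases hb : ((rest.map Prod.snd).foldl min c.2 + loc.2 + ps < 0)
        ∨ ((rest.map Prod.snd).foldl max c.2 + loc.2 + ps ≥ width)
    · have hA : (∃ d ∈ c :: rest, (d.1 + loc.1, d.2 + loc.2 + ps) ∈ state)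
          ∨ ∃ d ∈ c :: rest, d.2 + loc.2 + ps < 0 ∨ d.2 + loc.2 + ps ≥ width := by
        right
        rcases hb with h | h
        · obtain ⟨d, hd, h'⟩ := hmn.1 h; exact ⟨d, hd, Or.inl h'⟩
        · obtain ⟨d, hd, h'⟩ := hmx.1 h; exact ⟨d, hd, Or.inr h'⟩
      rw [if_pos hA, if_pos hb]
    · push_neg at hb
      have hbn : ¬ ((rest.map Prod.snd).foldl min c.2 + loc.2 + ps < 0
          ∨ (rest.map Prod.snd).foldl max c.2 + loc.2 + ps ≥ width) := by omega
      rw [if_neg hbn]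
      have hiff : ((∃ d ∈ c :: rest, (d.1 + loc.1, d.2 + loc.2 + ps) ∈ state)
            ∨ ∃ d ∈ c :: rest, d.2 + loc.2 + ps < 0 ∨ d.2 + loc.2 + ps ≥ width)
          ↔ (∃ s ∈ state, (s.1 - loc.1, s.2 - loc.2 - ps) ∈ PySem.Set.ofList (c :: rest)) := by
        rw [hcoll]
        constructor
        · rintro (h | ⟨d, hd, h' | h'⟩)
          · exact h
          · exact absurd (hmn.2 ⟨d, hd, h'⟩) (by omega)
          · exact absurd (hmx.2 ⟨d, hd, h'⟩) (by omega)
        · exact Or.inl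
      rw [if_congr hiff rfl rfl]

-- ===== VERDICT (by name: the statement is the Claim_ definition above) =====
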